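-- pv_equiv track=rewrite | github.com/prashdell/showtech-analyse | sonic_comprehensive_deep_dive_analyzer.py | extract_error_signatures
-- ===== SOURCE A (Python) =====
-- from typing import Dict, Any, List, Tuple
--
-- def extract_error_signatures(content: str) -> List[str]:
--     """Extract unique error signatures"""
--     signatures = []
--     lines = content.split('\n')
--
--     for line in lines:
--         line_lower = line.lower()
--         if any(keyword in line_lower for keyword in ['error', 'failed', 'failure']):
--             # Extract first 100 characters as signature
--             signature = line.strip()[:100]
--             if signature and signature not in signatures:
--                 signatures.append(signature)
--                 if len(signatures) >= 10:  # Limit to top 10 signatures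
--                     break
--
--     return signatures
-- ===== SOURCE B (Python) =====
-- def extract_error_signatures(content):
--     """Extract unique error signatures"""
--     first = {}
--     for idx, line in enumerate(content.split('\n')):
--         low = line.lower()
--         if 'error' in low or 'failed' in low or 'failure' in low:
--             sig = line.strip()[:100]
--             if sig:
--                 first.setdefault(sig, idx)
--     return sorted(first, key=first.get)[:10]
-- ===== Notes on version B (the rewrite author's own statement) =====
-- stated objective: alternative
-- what changed: Instead of A's single pass that dedups by membership in the growing output list and breaks at 10, B builds a hash index mapping each signature to its first line number via dict.setdefault, then reconstructs the order by sorting the keys on that stored index and slicing the first 10.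
import Mathlib
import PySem

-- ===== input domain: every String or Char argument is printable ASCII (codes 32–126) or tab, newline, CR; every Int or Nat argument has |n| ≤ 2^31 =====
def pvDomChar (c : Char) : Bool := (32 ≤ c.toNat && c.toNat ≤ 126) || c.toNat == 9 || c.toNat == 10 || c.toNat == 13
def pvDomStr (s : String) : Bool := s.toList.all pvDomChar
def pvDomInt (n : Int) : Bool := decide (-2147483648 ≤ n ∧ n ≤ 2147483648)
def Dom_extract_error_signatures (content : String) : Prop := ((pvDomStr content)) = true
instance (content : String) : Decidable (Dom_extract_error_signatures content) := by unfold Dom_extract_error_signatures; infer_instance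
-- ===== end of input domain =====

-- B replaces A's single accumulator loop (dedup by membership in the output, early break at 10)
-- by a hash index of each signature's FIRST line number (dict.setdefault), recovering the order
-- afterwards by sorting the keys on that index and slicing; objective: alternative.


-- ===== PORT A =====
-- A's keyword test: any(keyword in line.lower() for keyword in ['error','failed','failure'])
def pvMatchA (line : String) : Bool :=
  ["error", "failed", "failure"].any (fun k => PySem.Str.isIn k (PySem.Str.lower line))

-- A's per-line loop: running `signatures` accumulator, membership dedup, break at 10
def pvLoopA : List String → List String → List String
  | [], sigs => sigs
  | line :: rest, sigs =>
    if pvMatchA line then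
      let signature := PySem.Str.slice (PySem.Str.strip line) none (some 100)
      if signature ≠ "" ∧ signature ∉ sigs then
        let sigs' := sigs ++ [signature]
        if 10 ≤ sigs'.length then sigs'   -- break
        else pvLoopA rest sigs'
      else pvLoopA rest sigs
    else pvLoopA rest sigs

def extract_error_signatures (content : String) : List String :=
  pvLoopA ((PySem.Str.split? content "\n").getD []) []

-- ===== PORT B =====
-- B's loop body: first[sig] = idx for the first occurrence (dict.setdefault)
def pvStepB (d : PySem.Dict String Int) (p : Int × String) : PySem.Dict String Int :=
  let low := PySem.Str.lower p.2
  if PySem.Str.isIn "error" low || PySem.Str.isIn "failed" low || PySem.Str.isIn "failure" low then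
    let sig := PySem.Str.slice (PySem.Str.strip p.2) none (some 100)
    if sig ≠ "" then d.setdefault sig p.1 else d
  else d

-- B's final line: sorted(first, key=first.get)[:10]
def pvOrderB (first : PySem.Dict String Int) : List String :=
  (PySem.List.sorted first.keys (fun k => first.getD k 0) false).take 10

def extract_error_signatures_alt (content : String) : List String :=
  pvOrderB ((PySem.List.enumerate ((PySem.Str.split? content "\n").getD []) 0).foldl
      pvStepB PySem.Dict.empty)

-- ===== PRECONDITION & SPEC =====
def Spec_extract_error_signatures (content : String) (out : List String) : Prop := out = extract_error_signatures_alt content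
instance (content : String) (out : List String) : Decidable (Spec_extract_error_signatures content out) := by unfold Spec_extract_error_signatures; infer_instance

-- ===== CLAIM (what is proved, stated in full; the proofs are below) =====
def Claim_equal_extract_error_signatures : Prop := ∀ (content : String), Dom_extract_error_signatures content → Spec_extract_error_signatures content (extract_error_signatures content)

-- ===== LEMMAS AND PROOFS =====

-- the (nonempty, truncated) signature of a matching line, else none
def pvSig (line : String) : Option String :=
  if pvMatchA line then
    let s := PySem.Str.slice (PySem.Str.strip line) none (some 100)
    if s ≠ "" then some s else none
  else none

-- ordered dedup of xs relative to an already-seen prefix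
def pvDedupFrom (seen : List String) : List String → List String
  | [] => []
  | x :: xs => if x ∈ seen then pvDedupFrom seen xs else x :: pvDedupFrom (seen ++ [x]) xs

-- B's or-chain equals A's any-over-list keyword test
theorem pvMatch_eq (line : String) :
    (PySem.Str.isIn "error" (PySem.Str.lower line) || PySem.Str.isIn "failed" (PySem.Str.lower line)
      || PySem.Str.isIn "failure" (PySem.Str.lower line)) = pvMatchA line := by
  simp [pvMatchA, Bool.or_assoc]

-- A's loop is: take 10 of the ordered dedup of the matching signatures
theorem pvLoopA_eq (lines : List String) (sigs : List String) (h : sigs.length < 10) :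
    pvLoopA lines sigs = List.take 10 (sigs ++ pvDedupFrom sigs (lines.filterMap pvSig)) := by
  induction lines generalizing sigs with
  | nil =>
    simp [pvLoopA, pvDedupFrom, List.take_of_length_le (Nat.le_of_lt h)]
  | cons line rest ih =>
    by_cases hc : pvMatchA line = true
    · set s := PySem.Str.slice (PySem.Str.strip line) none (some 100) with hs
      by_cases hne : s = ""
      · simp [pvLoopA, pvSig, hc, ← hs, hne, ih _ h]
      · by_cases hin : s ∈ sigs
        · simp [pvLoopA, pvSig, hc, ← hs, hne, hin, pvDedupFrom, ih _ h]
        · by_cases hlen : 10 ≤ (sigs ++ [s]).length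
          · have hl : (sigs ++ [s]).length = 10 := by
              simp at hlen ⊢; omega
            simp only [pvLoopA, pvSig, hc, ← hs, List.filterMap_cons, hne, hin,
              not_false_iff, and_self, ne_eq, if_true, if_pos hlen]
            have key : ∀ D : List String, List.take 10 (sigs ++ s :: D) = sigs ++ [s] := by
              intro D
              have hD : sigs ++ s :: D = (sigs ++ [s]) ++ D := by simp
              rw [hD, ← hl, List.take_left]
            rw [pvDedupFrom, if_neg hin, key]
          · have h' : (sigs ++ [s]).length < 10 := by omega
            have h9 : ¬ 9 ≤ sigs.length := by simp at hlen; omega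
            simp [pvLoopA, pvSig, hc, ← hs, hne, hin, h9, pvDedupFrom, ih _ h']
    · simp [pvLoopA, pvSig, hc, ih _ h]

-- B's step written through the shared signature extractor
theorem pvStepB_eq (d : PySem.Dict String Int) (s : Int) (line : String) :
    pvStepB d (s, line) = match pvSig line with
      | none => d
      | some sg => d.setdefault sg s := by
  unfold pvStepB pvSig
  have hb := pvMatch_eq line
  by_cases hc : pvMatchA line = true
  · rw [hc] at hb
    simp only [hb]
    by_cases hne : PySem.Str.slice (PySem.Str.strip line) none (some 100) = ""
    · simp [hc, hne]
    · simp [hc, hne]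
  · rw [Bool.not_eq_true] at hc
    rw [hc] at hb
    simp only [hb]
    simp [hc]

-- invariant of B's dict-building fold: keys extend by the ordered dedup of the new
-- signatures, keys stay Nodup, and the stored first-occurrence indices stay increasing
theorem pvFoldB_inv (lines : List String) (s : Int) (d : PySem.Dict String Int)
    (hnd : d.keys.Nodup) (hv : ∀ v ∈ d.values, v < s) (hp : d.values.Pairwise (· < ·)) :
    ((PySem.List.enumerate lines s).foldl pvStepB d).keys
        = d.keys ++ pvDedupFrom d.keys (lines.filterMap pvSig)
      ∧ ((PySem.List.enumerate lines s).foldl pvStepB d).keys.Nodup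
      ∧ ((PySem.List.enumerate lines s).foldl pvStepB d).values.Pairwise (· < ·) := by
  induction lines generalizing s d with
  | nil => simpa [pvDedupFrom] using ⟨hnd, hp⟩
  | cons line rest ih =>
    rw [PySem.List.enumerate_cons, List.foldl_cons, pvStepB_eq]
    rcases hsig : pvSig line with _ | sg
    · simpa [hsig, pvDedupFrom] using
        ih (s + 1) d hnd (fun v hvv => lt_trans (hv v hvv) (by omega)) hp
    · by_cases hin : sg ∈ d.keys
      · have hcont : d.contains sg = true := by
          simpa [PySem.Dict.contains_iff_mem_keys] using hin
        have := ih (s + 1) d hnd (fun v hvv => lt_trans (hv v hvv) (by omega)) hp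
        simpa [hsig, PySem.Dict.setdefault_of_contains _ _ hcont, pvDedupFrom, hin] using this
      · have hcont : d.contains sg = false := by
          rw [← Bool.not_eq_true]
          simpa [PySem.Dict.contains_iff_mem_keys] using hin
        have hitems : (d.setdefault sg s).items = d.items ++ [(sg, s)] := by
          rw [PySem.Dict.setdefault_of_not_contains _ _ hcont,
            PySem.Dict.items_insert_of_not_contains _ _ hcont]
        have hkeys' : (d.setdefault sg s).keys = d.keys ++ [sg] := by
          simp [PySem.Dict.keys, hitems]
        have hvals' : (d.setdefault sg s).values = d.values ++ [s] := by
          simp [PySem.Dict.values, hitems]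
        have hnd' : (d.setdefault sg s).keys.Nodup := by
          rw [hkeys']
          exact List.Nodup.append hnd (List.nodup_singleton sg)
            (by simpa using fun h => hin h)
        have hv' : ∀ v ∈ (d.setdefault sg s).values, v < s + 1 := by
          intro v hvv
          rw [hvals'] at hvv
          rcases List.mem_append.1 hvv with h1 | h1
          · exact lt_trans (hv v h1) (by omega)
          · simp at h1; omega
        have hp' : (d.setdefault sg s).values.Pairwise (· < ·) := by
          rw [hvals']
          exact List.pairwise_append.2 ⟨hp, List.pairwise_singleton _ _,
            fun a ha b hb => by simp at hb; subst hb; exact hv a ha⟩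
        have := ih (s + 1) _ hnd' hv' hp'
        simpa [hsig, pvDedupFrom, hin, hkeys'] using this

-- a Nodup-keyed dict with strictly increasing values: sorting its keys by their
-- stored value leaves them in insertion order
theorem pvSorted_keys (d : PySem.Dict String Int) (hnd : d.keys.Nodup)
    (hp : d.values.Pairwise (· < ·)) :
    PySem.List.sorted d.keys (fun k => d.getD k 0) false = d.keys := by
  apply PySem.List.sorted_eq_of_perm_of_pairwise_lt _ _ _ (List.Perm.refl _)
  have hv : d.values = d.keys.map (fun k => d.getD k 0) :=
    PySem.Dict.values_eq_map_keys d hnd 0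
  rw [hv] at hp
  exact (List.pairwise_map).1 hp

-- ordered dedup from an empty seen-set is Python's dict.fromkeys dedup
theorem pvDedupFrom_nil (xs : List String) :
    pvDedupFrom [] xs = PySem.List.dedup xs := by
  suffices h : ∀ seen ys, seen ++ pvDedupFrom seen ys = List.foldl PySem.Set.add seen ys by
    simpa [PySem.List.dedup_eq_ofList, PySem.Set.ofList, PySem.Set.empty] using h [] xs
  intro seen ys
  induction ys generalizing seen with
  | nil => simp [pvDedupFrom]
  | cons y ys ih =>
    by_cases hy : y ∈ seen
    · simp [pvDedupFrom, PySem.Set.add, hy, ih]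
    · simp [pvDedupFrom, PySem.Set.add, hy, ← ih]

-- ===== VERDICT (by name: the statement is the Claim_ definition above) =====
theorem extract_error_signatures_spec : Claim_equal_extract_error_signatures := by
  intro content _
  unfold Spec_extract_error_signatures extract_error_signatures extract_error_signatures_alt pvOrderB
  set lines := (PySem.Str.split? content "\n").getD [] with hl
  obtain ⟨hkeys, hnd, hp⟩ := pvFoldB_inv lines 0 PySem.Dict.empty (by decide) (by decide) (by decide)
  rw [pvLoopA_eq _ [] (by simp), pvSorted_keys _ hnd hp, hkeys]
  simp [PySem.Dict.keys_empty, pvDedupFrom_nil]
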